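-- pv_equiv track=rewrite | github.com/ThomasPolman/StudieWeek4 | censor.py | censor_list_and_neg_words
-- ===== SOURCE A (Python) =====
-- punctuation = [',', '.', '(', ')', '!', '?', '%', '/', '"']
--
-- def censor_list_and_neg_words(document, lst, neg_words):
--   document = document.lower()
--   listed_document = []
--   for x in document.split(" "):
--     words = x.split("\n")
--     for word in words:
--       for j in punctuation:
--         word = word.strip(j)
--       listed_document.append(word)
--   count = 0
--   for i in range(len(listed_document)):
--     if listed_document[i] in neg_words:
--       count += 1
--       if count > 2:
--         censor = ""
--         for x in range(len(listed_document[i])):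
--           censor += "*"
--         listed_document[i] = listed_document[i].replace(listed_document[i], censor)
--   for i in range(len(listed_document)):
--     if listed_document[i] in lst:
--       censor = ""
--       for x in range(len(listed_document[i])):
--         censor += "*"
--       listed_document[i] = listed_document[i].replace(listed_document[i], censor)
--   result = ' '.join(listed_document)
--   return result.capitalize()
-- ===== SOURCE B (Python) =====
-- punctuation = [',', '.', '(', ')', '!', '?', '%', '/', '"']
--
-- def _clean(word):
--     for p in punctuation:
--         word = word.strip(p)
--     return word
--
-- def censor_list_and_neg_words(document, lst, neg_words):
--     tokens = [_clean(w)
--               for chunk in document.lower().split(" ")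
--               for w in chunk.split("\n")]
--     neg_set = set(neg_words)
--     hits = [i for i, w in enumerate(tokens) if w in neg_set]
--     third = hits[2] if len(hits) > 2 else len(tokens)
--     safe = tokens[:third]
--     marked = ["*" * len(w) if w in neg_set else w for w in tokens[third:]]
--     lst_set = set(lst)
--     out = ["*" * len(w) if w in lst_set else w for w in safe + marked]
--     return " ".join(out).capitalize()
-- ===== Notes on version B (the rewrite author's own statement) =====
-- stated objective: alternative
-- what changed: A's running-counter scan that censors neg-words once a counter exceeds 2, plus its per-token star-building and str.replace loops, are replaced by computing the index of the third neg-word occurrence from an enumerate/filter index table and then censoring by slicing the token list at that index and mapping star-replication over the tail; both censoring passes use set membership and '*'*len(w).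
import Mathlib
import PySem

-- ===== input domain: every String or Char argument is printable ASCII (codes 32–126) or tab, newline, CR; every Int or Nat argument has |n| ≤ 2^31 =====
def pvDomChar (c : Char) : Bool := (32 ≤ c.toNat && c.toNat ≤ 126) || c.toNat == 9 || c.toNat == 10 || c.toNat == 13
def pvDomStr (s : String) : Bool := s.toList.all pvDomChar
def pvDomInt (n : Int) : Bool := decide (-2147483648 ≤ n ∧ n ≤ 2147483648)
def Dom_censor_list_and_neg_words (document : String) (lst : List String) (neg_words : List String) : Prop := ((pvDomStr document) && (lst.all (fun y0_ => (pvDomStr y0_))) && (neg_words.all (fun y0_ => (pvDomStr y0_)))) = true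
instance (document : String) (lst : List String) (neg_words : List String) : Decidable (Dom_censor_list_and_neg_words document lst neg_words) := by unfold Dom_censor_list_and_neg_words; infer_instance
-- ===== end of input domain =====

-- B re-decomposes A's running-counter censor loop into 'find the index of the third
-- neg-word occurrence, then censor by slicing + maps'; objective: alternative decomposition.

-- ===== PORT A =====

def pvPunct : List Char := [',', '.', '(', ')', '!', '?', '%', '/', '"']

-- port of str.capitalize (first char uppercased, rest lowercased; exact on the ASCII domain)
def pvCapitalize : List Char → List Char
  | [] => []
  | c :: cs => PySem.Chars.upperChar c :: PySem.Chars.lower cs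

-- A's inner 'for j in punctuation: word = word.strip(j)'
def pvStripA (word : List Char) : List Char :=
  pvPunct.foldl (fun w j => PySem.Chars.stripChars w [j]) word

-- A's star-building loop followed by listed_document[i].replace(listed_document[i], censor)
def pvCensorA (w : List Char) : List Char :=
  let censor := (PySem.List.pyRange 0 (w.length : Int) 1).foldl (fun acc _ => acc ++ ['*']) ([] : List Char)
  PySem.Chars.replace w w censor

-- A's first indexed loop (running counter, censor from the third occurrence on)
def pvNegLoopA (neg : List (List Char)) : Nat → List (List Char) → List (List Char)
  | _, [] => []
  | count, w :: ws =>
    if w ∈ neg then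
      (if count + 1 > 2 then pvCensorA w :: pvNegLoopA neg (count + 1) ws
       else w :: pvNegLoopA neg (count + 1) ws)
    else w :: pvNegLoopA neg count ws

def censor_list_and_neg_words (document : String) (lst : List String) (neg_words : List String) : String :=
  let doc := PySem.Chars.lower document.toList
  let listed := (PySem.Chars.splitOn doc [' ']).foldl
    (fun acc x => (PySem.Chars.splitOn x ['\n']).foldl (fun acc2 word => acc2 ++ [pvStripA word]) acc) []
  let listed2 := pvNegLoopA (neg_words.map String.toList) 0 listed
  let listed3 := listed2.map (fun w => if w ∈ lst.map String.toList then pvCensorA w else w)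
  String.ofList (pvCapitalize (PySem.Chars.join [' '] listed3))

-- ===== PORT B =====

def pvClean (word : List Char) : List Char :=
  pvPunct.foldl (fun w j => PySem.Chars.stripChars w [j]) word

def pvStars (w : List Char) : List Char := List.replicate w.length '*'

def censor_list_and_neg_words_alt (document : String) (lst : List String) (neg_words : List String) : String :=
  let tokens := (PySem.Chars.splitOn (PySem.Chars.lower document.toList) [' ']).flatMap
      (fun chunk => (PySem.Chars.splitOn chunk ['\n']).map pvClean)
  let negSet := PySem.Set.ofList (neg_words.map String.toList)
  let hits := ((PySem.List.enumerate tokens 0).filter (fun p => negSet.contains p.2)).map (·.1)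
  let third : Int := if 2 < hits.length then PySem.List.pyGetD hits 2 0 else (tokens.length : Int)
  let safe := PySem.List.slice tokens none (some third)
  let marked := (PySem.List.slice tokens (some third) none).map
      (fun w => if negSet.contains w then pvStars w else w)
  let lstSet := PySem.Set.ofList (lst.map String.toList)
  let out := (safe ++ marked).map (fun w => if lstSet.contains w then pvStars w else w)
  String.ofList (pvCapitalize (PySem.Chars.join [' '] out))

-- ===== PRECONDITION & SPEC =====
def Spec_censor_list_and_neg_words (document : String) (lst : List String) (neg_words : List String) (out : String) : Prop := out = censor_list_and_neg_words_alt document lst neg_words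
instance (document : String) (lst : List String) (neg_words : List String) (out : String) : Decidable (Spec_censor_list_and_neg_words document lst neg_words out) := by unfold Spec_censor_list_and_neg_words; infer_instance

-- ===== CLAIM (what is proved, stated in full; the proofs are below) =====
def Claim_equal_censor_list_and_neg_words : Prop := ∀ (document : String) (lst : List String) (neg_words : List String), Dom_censor_list_and_neg_words document lst neg_words → Spec_censor_list_and_neg_words document lst neg_words (censor_list_and_neg_words document lst neg_words)

-- ===== LEMMAS AND PROOFS =====

-- index of the m-th (1-based) neg hit, or list length if there are fewer than m hits
def pvNth (neg : List (List Char)) : Nat → List (List Char) → Nat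
  | 0, _ => 0
  | _ + 1, [] => 0
  | m + 1, w :: ws =>
    if w ∈ neg then (if m = 0 then 0 else 1 + pvNth neg m ws)
    else 1 + pvNth neg (m + 1) ws

theorem pv_go_nil (old new acc : List Char) (fuel : Nat) :
    PySem.Chars.replace.go old new fuel [] acc = acc.reverse := by
  cases fuel <;> simp [PySem.Chars.replace.go]

-- s.replace(s, c) = c (Python: the single whole-string occurrence is replaced)
theorem pv_replace_self (s c : List Char) : PySem.Chars.replace s s c = c := by
  cases s with
  | nil => simp [PySem.Chars.replace]
  | cons a t =>
      have hp : (a :: t).isPrefixOf (a :: t) = true := by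
        simp [List.isPrefixOf_iff_prefix]
      simp [PySem.Chars.replace, PySem.Chars.replace.go, hp, pv_go_nil]

theorem pv_censorA_eq_stars (w : List Char) : pvCensorA w = pvStars w := by
  have h : (PySem.List.pyRange 0 (w.length : Int) 1).foldl (fun acc _ => acc ++ ['*']) ([] : List Char)
      = List.replicate w.length '*' := by
    rw [PySem.List.foldl_append_singleton_eq_map (fun _ => '*')]
    simp [PySem.List.pyRange_zero_natCast, List.eq_replicate_iff]
  simp [pvCensorA, h, pv_replace_self, pvStars]

theorem pv_contains_ofList (xs : List (List Char)) (y : List Char) :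
    (PySem.Set.ofList xs).contains y = decide (y ∈ xs) := by
  simp [PySem.Set.contains, PySem.Set.mem_ofList]

-- A's counter loop = take-before-the-third-hit ++ censor-map after it
theorem pv_negLoop_eq (neg : List (List Char)) (ts : List (List Char)) : ∀ c : Nat,
    pvNegLoopA neg c ts =
      ts.take (pvNth neg (3 - c) ts) ++
        (ts.drop (pvNth neg (3 - c) ts)).map (fun w => if w ∈ neg then pvStars w else w) := by
  induction ts with
  | nil => intro c; cases h : 3 - c <;> simp [pvNegLoopA, pvNth]
  | cons w ws ih =>
    intro c
    by_cases hw : w ∈ neg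
    · by_cases hc : c + 1 > 2
      · have h3 : 3 - c = 0 ∨ 3 - c = 1 := by omega
        have h3' : 3 - (c + 1) = 0 := by omega
        rcases h3 with h3 | h3 <;>
          simp [pvNegLoopA, hw, hc, h3, pvNth, ih (c+1), h3', pv_censorA_eq_stars]
      · have h3 : 3 - c = (3 - (c+1)) + 1 := by omega
        have h3'' : 3 - (c + 1) ≠ 0 := by omega
        rw [pvNegLoopA]
        simp only [hw, if_pos, hc, h3, pvNth, if_neg h3'']
        simp [ih (c+1), List.take_succ_cons, List.drop_succ_cons, Nat.add_comm 1]
    · rcases Nat.eq_zero_or_pos (3 - c) with h3 | h3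
      · simp [pvNegLoopA, hw, pvNth, h3, ih c]
      · obtain ⟨m, hm⟩ : ∃ m, 3 - c = m + 1 := ⟨3 - c - 1, by omega⟩
        rw [pvNegLoopA]
        simp only [hw, hm, pvNth]
        simp [ih c, hm, Nat.add_comm 1]

-- the hits index list reads back pvNth
theorem pv_hits_get (neg : List (List Char)) (ts : List (List Char)) : ∀ (s m : Nat),
    ((((PySem.List.enumerate ts (s : Int)).filter (fun p => decide (p.2 ∈ neg))).map (·.1))[m]?).getD
        ((s : Int) + ts.length) = (s : Int) + pvNth neg (m + 1) ts := by
  induction ts with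
  | nil => intro s m; simp [PySem.List.enumerate_nil, pvNth]
  | cons w ws ih =>
    intro s m
    rw [PySem.List.enumerate_cons]
    have this1 := ih (s + 1) m
    push_cast at this1
    by_cases hw : w ∈ neg
    · cases m with
      | zero => simp [hw, pvNth]
      | succ m =>
          have this2 := ih (s + 1) m
          push_cast at this2
          simp only [List.filter_cons, hw, decide_true, if_true, List.map_cons,
            List.getElem?_cons_succ, pvNth, Nat.succ_ne_zero, if_false, List.length_cons]
          push_cast
          rw [show ((s:Int) + (((ws.length : Int)) + 1)) = ((s:Int)+1) + ws.length by ring, this2]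
          ring
    · simp only [List.filter_cons, hw, decide_false, Bool.false_eq_true, if_false, pvNth,
        List.length_cons]
      push_cast
      rw [show ((s:Int) + (((ws.length : Int)) + 1)) = ((s:Int)+1) + ws.length by ring, this1]
      ring

theorem pv_hits_length (neg : List (List Char)) (ts : List (List Char)) (s : Int) :
    (((PySem.List.enumerate ts s).filter (fun p => decide (p.2 ∈ neg))).map (·.1)).length
      = ts.countP (fun w => decide (w ∈ neg)) := by
  induction ts generalizing s with
  | nil => simp [PySem.List.enumerate_nil]
  | cons w ws ih =>
    rw [PySem.List.enumerate_cons]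
    by_cases hw : w ∈ neg <;> simp [hw, ih]

theorem pv_nth_of_few (neg : List (List Char)) (ts : List (List Char)) : ∀ (m : Nat),
    ts.countP (fun w => decide (w ∈ neg)) ≤ m → pvNth neg (m + 1) ts = ts.length := by
  induction ts with
  | nil => intro m _; simp [pvNth]
  | cons w ws ih =>
    intro m h
    rw [List.countP_cons] at h
    by_cases hw : w ∈ neg
    · simp only [hw, decide_true, if_true] at h
      obtain ⟨m', rfl⟩ : ∃ m', m = m' + 1 := ⟨m - 1, by omega⟩
      simp [pvNth, hw, ih m' (by omega), Nat.add_comm 1]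
    · simp only [hw, decide_false] at h
      simp [pvNth, hw, ih m (by omega), Nat.add_comm 1]

-- ===== VERDICT (by name: the statement is the Claim_ definition above) =====
theorem censor_list_and_neg_words_spec : Claim_equal_censor_list_and_neg_words := by
  intro document lst neg_words _hdom
  unfold Spec_censor_list_and_neg_words
  unfold censor_list_and_neg_words censor_list_and_neg_words_alt
  simp only [pv_contains_ofList, decide_eq_true_eq, pv_censorA_eq_stars]
  set neg : List (List Char) := neg_words.map String.toList with hneg
  set chunks : List (List Char) :=
    PySem.Chars.splitOn (PySem.Chars.lower document.toList) [' '] with hchunks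
  set ts : List (List Char) :=
    chunks.flatMap (fun c => (PySem.Chars.splitOn c ['\n']).map pvClean) with hts
  have htok : chunks.foldl
      (fun acc x => (PySem.Chars.splitOn x ['\n']).foldl (fun acc2 word => acc2 ++ [pvStripA word]) acc)
      [] = ts := by
    have h1 : (fun (acc : List (List Char)) (x : List Char) =>
        (PySem.Chars.splitOn x ['\n']).foldl (fun acc2 word => acc2 ++ [pvStripA word]) acc)
        = fun acc x => acc ++ (PySem.Chars.splitOn x ['\n']).map pvClean := by
      funext acc x
      rw [PySem.List.foldl_append_singleton_eq_map]
      rfl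
    rw [h1, PySem.List.foldl_append_eq_flatMap]
    simp [hts]
  rw [htok, pv_negLoop_eq neg ts 0]
  set hits : List Int :=
    (((PySem.List.enumerate ts 0).filter (fun p => decide (p.2 ∈ neg))).map (·.1)) with hhits
  have hthird : (if 2 < hits.length then PySem.List.pyGetD hits 2 0 else (ts.length : Int))
      = ((pvNth neg 3 ts : Nat) : Int) := by
    by_cases hlen : 2 < hits.length
    · have hg := pv_hits_get neg ts 0 2
      simp only [Nat.cast_zero, zero_add] at hg
      have h2 : hits[2]? = some hits[2] := List.getElem?_eq_getElem hlen
      rw [if_pos hlen, PySem.List.pyGetD_eq_getElem hits 0 (by norm_num) (by exact_mod_cast hlen)]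
      have hg2 : (some hits[2]).getD ((ts.length : Int)) = ((pvNth neg 3 ts : Nat) : Int) := by
        rw [← h2]; exact hg
      simpa using hg2
    · rw [if_neg hlen]
      have hc : ts.countP (fun w => decide (w ∈ neg)) ≤ 2 := by
        rw [← pv_hits_length neg ts 0]
        exact le_of_not_gt (by exact_mod_cast hlen)
      rw [pv_nth_of_few neg ts 2 hc]
  rw [hthird, PySem.List.slice_to ts (by positivity), PySem.List.slice_from ts (by positivity),
    Int.toNat_natCast]
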